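-- pv_equiv track=rewrite | github.com/shepherdingelectrons/Duncatron | Duncatron C  compiler and ASM/simple_assembler.py | process_datastring
-- ===== SOURCE A (Python) =====
-- def process_datastring(data_str):
--     # Check for ',' not in quotation marks and concatenate, return string
--     in_quote = 1 # Inside a quote mark by default
--     return_str = ""
--     for char in data_str:
--         if char=="'":
--             in_quote = 1-in_quote
--             if in_quote: # Just started a new string so terminate the old one
--                 return_str+=chr(0)
--         else:
--             if in_quote:
--                 return_str+=char # Only add characters in quotes
--     return return_str
-- ===== SOURCE B (Python) =====
-- def process_datastring(data_str):
--     # Split on quotes: segments at even indices are the in-quote pieces;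
--     # join them with a NUL terminator between consecutive kept pieces.
--     return chr(0).join(data_str.split("'")[::2])
-- ===== Notes on version B (the rewrite author's own statement) =====
-- stated objective: idiomatic
-- what changed: Replaced the explicit character loop with its quote-state flag and string accumulator by split-on-quote / stride-2 slice / join-on-NUL (the even-indexed split segments are exactly the in-quote pieces); the C-level str.split/slice/join avoid the per-character Python loop.
import Mathlib
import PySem

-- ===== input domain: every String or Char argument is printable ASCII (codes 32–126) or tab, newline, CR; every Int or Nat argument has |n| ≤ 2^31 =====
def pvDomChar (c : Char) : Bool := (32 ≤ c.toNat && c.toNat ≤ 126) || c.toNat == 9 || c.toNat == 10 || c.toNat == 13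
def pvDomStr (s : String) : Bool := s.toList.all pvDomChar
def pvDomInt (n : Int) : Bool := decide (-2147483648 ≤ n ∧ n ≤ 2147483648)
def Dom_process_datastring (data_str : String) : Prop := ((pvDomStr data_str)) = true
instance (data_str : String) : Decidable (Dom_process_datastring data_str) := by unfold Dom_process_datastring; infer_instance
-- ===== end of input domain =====

-- B replaces A's character loop with its quote-state flag by split-on-quote / stride-2 slice / join-on-NUL (idiomatic; same result on every string).

-- ===== PORT A =====
-- Loop over the characters keeping (in_quote, return_str); in_quote is Python's 0/1 int, truthiness is ≠ 0.
def process_datastring (data_str : String) : String :=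
  let r := data_str.toList.foldl
    (fun (st : Int × List Char) char =>
      if char = '\'' then
        let in_quote := 1 - st.1
        if in_quote ≠ 0 then (in_quote, st.2 ++ [Char.ofNat 0]) else (in_quote, st.2)
      else
        if st.1 ≠ 0 then (st.1, st.2 ++ [char]) else st)
    ((1 : Int), ([] : List Char))
  String.ofList r.2

-- ===== PORT B =====
-- chr(0).join(data_str.split("'")[::2]); split("'") via split? (none only for empty sep), [::2] via slice? (none only for step 0).
def process_datastring_alt (data_str : String) : String :=
  PySem.Str.join (String.ofList [Char.ofNat 0])
    ((PySem.List.slice? ((PySem.Str.split? data_str "'").getD []) none none 2).getD [])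

-- ===== PRECONDITION & SPEC =====
def Spec_process_datastring (data_str : String) (out : String) : Prop := out = process_datastring_alt data_str
instance (data_str : String) (out : String) : Decidable (Spec_process_datastring data_str out) := by unfold Spec_process_datastring; infer_instance

-- ===== CLAIM (what is proved, stated in full; the proofs are below) =====
def Claim_equal_process_datastring : Prop := ∀ (data_str : String), Dom_process_datastring data_str → Spec_process_datastring data_str (process_datastring data_str)

-- ===== LEMMAS AND PROOFS =====

-- Common specification of the scanner: fQ q cs = output of A's loop resumed in quote-state q.
def fQ : Bool → List Char → List Char
  | _, [] => []
  | q, c :: r =>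
    if c = '\'' then (if q then fQ false r else Char.ofNat 0 :: fQ true r)
    else (if q then c :: fQ q r else fQ q r)

-- A's loop body, named so the fold lemma can be stated about it (the port's inline lambda is literally this).
def pvStep (st : Int × List Char) (char : Char) : Int × List Char :=
  if char = '\'' then
    let in_quote := 1 - st.1
    if in_quote ≠ 0 then (in_quote, st.2 ++ [Char.ofNat 0]) else (in_quote, st.2)
  else
    if st.1 ≠ 0 then (st.1, st.2 ++ [char]) else st

-- split of cs on quotes, accumulating the current (reversed) segment, the way splitOn.go does.
def splitQ : List Char → List Char → List (List Char)
  | pre, [] => [pre.reverse]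
  | pre, c :: r => if c = '\'' then pre.reverse :: splitQ [] r else splitQ (c :: pre) r

-- every second element, keeping (keep = true) or dropping (keep = false) the head.
def strideSel {α : Type} : Bool → List α → List α
  | _, [] => []
  | keep, x :: l => if keep then x :: strideSel (!keep) l else strideSel (!keep) l

-- join with one NUL before every element / between consecutive elements.
def nulJoin (l : List (List Char)) : List Char := l.flatMap (fun x => Char.ofNat 0 :: x)

def myJoin : List (List Char) → List Char
  | [] => []
  | x :: l => x ++ nulJoin l

-- ---- A-side: the fold is fQ ----
theorem foldA (cs : List Char) : ∀ (q : Bool) (acc : List Char),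
    (cs.foldl pvStep ((if q then 1 else 0 : Int), acc)).2 = acc ++ fQ q cs := by
  induction cs with
  | nil => intro q acc; simp [fQ]
  | cons c r ih =>
    intro q acc
    rw [List.foldl_cons]
    by_cases hc : c = '\''
    · cases q
      · have h1 : pvStep ((if false then 1 else 0 : Int), acc) c
            = ((if true then 1 else 0 : Int), acc ++ [Char.ofNat 0]) := by
          simp [pvStep, hc]
        rw [h1, ih true]; simp [fQ, hc]
      · have h1 : pvStep ((if true then 1 else 0 : Int), acc) c
            = ((if false then 1 else 0 : Int), acc) := by
          simp [pvStep, hc]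
        rw [h1, ih false]; simp [fQ, hc]
    · cases q
      · have h1 : pvStep ((if false then 1 else 0 : Int), acc) c
            = ((if false then 1 else 0 : Int), acc) := by
          simp [pvStep, hc]
        rw [h1, ih false]; simp [fQ, hc]
      · have h1 : pvStep ((if true then 1 else 0 : Int), acc) c
            = ((if true then 1 else 0 : Int), acc ++ [c]) := by
          simp [pvStep, hc]
        rw [h1, ih true]; simp [fQ, hc]

-- ---- B-side: splitOn on a single quote is splitQ ----
theorem go_splitQ : ∀ (fuel : Nat) (l : List Char), l.length < fuel →
    ∀ (cur : List Char) (acc : List (List Char)),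
      PySem.Chars.splitOn.go ['\''] fuel l cur acc = acc.reverse ++ splitQ cur l := by
  intro fuel
  induction fuel with
  | zero => intro l h cur acc; omega
  | succ n ih =>
    intro l h cur acc
    cases l with
    | nil =>
      rw [PySem.Chars.splitOn.go]
      simp [splitQ]
      omega
    | cons c rest =>
      rw [PySem.Chars.splitOn.go]
      by_cases hc : c = '\''
      · subst hc
        have hr : rest.length < n := by simp at h; omega
        simp [List.isPrefixOf, ih rest hr, splitQ]
      · have hr : rest.length < n := by simp at h; omega
        simp [List.isPrefixOf, hc, splitQ, ih rest hr (c :: cur) acc]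
        intro h'
        exact absurd h'.symm hc

theorem splitOn_eq_splitQ (cs : List Char) :
    PySem.Chars.splitOn cs ['\''] = splitQ [] cs := by
  unfold PySem.Chars.splitOn
  rw [go_splitQ (cs.length + 1) cs (by omega)]
  simp

-- ---- B-side: [::2] is strideSel true ----
theorem filterMap_stride {α : Type} : ∀ (n : Nat) (xs : List α), xs.length ≤ n →
    (List.range ((xs.length + 1) / 2)).filterMap (fun k => xs[2 * k]?) = strideSel true xs := by
  intro n
  induction n with
  | zero =>
    intro xs h
    cases xs with
    | nil => simp [strideSel]
    | cons a t => simp at h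
  | succ n ih =>
    intro xs h
    match xs with
    | [] => simp [strideSel]
    | [a] => simp [List.range_succ, strideSel]
    | a :: b :: r =>
      have hlen : ((a :: b :: r).length + 1) / 2 = (r.length + 1) / 2 + 1 := by
        simp; omega
      rw [hlen, List.range_succ_eq_map, List.filterMap_cons]
      have hcomp : ((fun k => (a :: b :: r)[2 * k]?) ∘ (fun k => k + 1))
          = fun k => r[2 * k]? := by
        funext k
        have h2 : 2 * (k + 1) = (2 * k) + 1 + 1 := by ring
        simp [Function.comp, h2]
      simp only [List.filterMap_map, hcomp]
      rw [ih r (by simp at h; omega)]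
      simp [strideSel]

theorem slice?_map' {α β : Type} (f : α → β) (xs : List α) (a? b? : Option Int) (st : Int) :
    PySem.List.slice? (xs.map f) a? b? st = Option.map (List.map f) (PySem.List.slice? xs a? b? st) := by
  simp only [PySem.List.slice?, List.length_map]
  by_cases h : st = 0
  · simp [h]
  · simp [h, List.map_filterMap, List.getElem?_map]

theorem slice2_eq_stride {α : Type} (xs : List α) :
    (PySem.List.slice? xs none none 2).getD [] = strideSel true xs := by
  rw [← filterMap_stride xs.length xs le_rfl]
  simp only [PySem.List.slice?, PySem.List.sliceIndices]
  norm_num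
  have hcount : (if 0 < xs.length
      then (((xs.length : Int) + 2 - 1) / 2).toNat else 0) = (xs.length + 1) / 2 := by
    by_cases h : 0 < xs.length
    · rw [if_pos h]; omega
    · rw [if_neg h]; omega
  rw [hcount]
  congr 1

-- ---- B-side: joining every second splitQ segment is fQ ----
theorem splitQ_ne_nil : ∀ (cs pre : List Char), splitQ pre cs ≠ [] := by
  intro cs
  induction cs with
  | nil => intro pre; simp [splitQ]
  | cons c r ih =>
    intro pre
    by_cases hc : c = '\'' <;> simp [splitQ, hc, ih]

theorem nulJoin_strideTrue (l : List (List Char)) (h : l ≠ []) :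
    nulJoin (strideSel true l) = Char.ofNat 0 :: myJoin (strideSel true l) := by
  cases l with
  | nil => exact absurd rfl h
  | cons x t => simp [strideSel, nulJoin, myJoin]

theorem join_stride_splitQ : ∀ (cs pre : List Char),
    myJoin (strideSel true (splitQ pre cs)) = pre.reverse ++ fQ true cs ∧
    nulJoin (strideSel false (splitQ pre cs)) = fQ false cs := by
  intro cs
  induction cs with
  | nil => intro pre; simp [splitQ, strideSel, myJoin, nulJoin, fQ]
  | cons c r ih =>
    intro pre
    by_cases hc : c = '\''
    · subst hc
      have hsp : splitQ pre ('\'' :: r) = pre.reverse :: splitQ [] r := by simp [splitQ]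
      constructor
      · rw [hsp]
        have hstr : strideSel true (pre.reverse :: splitQ [] r)
            = pre.reverse :: strideSel false (splitQ [] r) := by simp [strideSel]
        rw [hstr]
        show pre.reverse ++ nulJoin (strideSel false (splitQ [] r)) = _
        rw [(ih []).2]
        simp [fQ]
      · rw [hsp]
        have hstr : strideSel false (pre.reverse :: splitQ [] r)
            = strideSel true (splitQ [] r) := by simp [strideSel]
        rw [hstr, nulJoin_strideTrue _ (splitQ_ne_nil r []), (ih []).1]
        simp [fQ]
    · constructor
      · have h1 := (ih (c :: pre)).1
        simp only [splitQ, hc, fQ, if_false] at *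
        simp [h1]
      · have h2 := (ih (c :: pre)).2
        simp only [splitQ, hc, fQ, if_false] at *
        simp [h2]

-- intercalate with the one-character NUL separator is myJoin.
theorem intercalate_cons_nul (x : List Char) (s : List (List Char)) :
    [Char.ofNat 0].intercalate (x :: s) = x ++ s.flatMap (fun y => Char.ofNat 0 :: y) := by
  induction s generalizing x with
  | nil => simp [List.intercalate]
  | cons y t ih =>
    simp [List.intercalate, List.intersperse] at *
    simp [ih]

theorem intercalate_nul (l : List (List Char)) :
    List.intercalate [Char.ofNat 0] l = myJoin l := by
  cases l with
  | nil => simp [List.intercalate, myJoin]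
  | cons x t => rw [intercalate_cons_nul]; rfl

-- ===== VERDICT (by name: the statement is the Claim_ definition above) =====
theorem process_datastring_spec : Claim_equal_process_datastring := by
  intro ds _
  unfold Spec_process_datastring
  -- A's value
  have hA : process_datastring ds = String.ofList (fQ true ds.toList) := by
    show String.ofList ((ds.toList.foldl pvStep ((1 : Int), ([] : List Char))).2) = _
    rw [show ((1 : Int), ([] : List Char))
        = ((if true then 1 else 0 : Int), ([] : List Char)) from rfl, foldA]
    simp
  -- B's split as splitQ
  have hsplit : ((PySem.Str.split? ds "'").getD []).map String.toList
      = splitQ [] ds.toList := by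
    have h := PySem.Str.split?_map ds "'"
    rw [show ("'" : String).toList = ['\''] from rfl] at h
    simp only [PySem.Chars.split?, List.isEmpty_cons] at h
    cases hs : PySem.Str.split? ds "'" with
    | none => rw [hs] at h; simp at h
    | some parts =>
      rw [hs] at h
      simp only [Option.map_some, Bool.false_eq_true, if_false, Option.some.injEq] at h
      simp [h, splitOn_eq_splitQ]
  -- B's value, as a character list
  have hB : (process_datastring_alt ds).toList = fQ true ds.toList := by
    unfold process_datastring_alt
    rw [PySem.Str.toList_join]
    have hm : ((PySem.List.slice? ((PySem.Str.split? ds "'").getD []) none none 2).getD []).map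
          String.toList
        = (PySem.List.slice? (((PySem.Str.split? ds "'").getD []).map String.toList)
            none none 2).getD [] := by
      rw [slice?_map']
      cases PySem.List.slice? ((PySem.Str.split? ds "'").getD []) none none 2 <;> simp
    rw [hm, hsplit, slice2_eq_stride]
    have hj := (join_stride_splitQ ds.toList []).1
    simp only [List.reverse_nil, List.nil_append] at hj
    rw [String.toList_ofList]
    show List.intercalate [Char.ofNat 0] _ = _
    rw [intercalate_nul, hj]
  rw [hA, ← hB, String.ofList_toList]
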